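-- pv_equiv track=rewrite | github.com/JAPLJ/icfpc2025_pigimarl | eto/src/02.py | has_similar_door
-- ===== SOURCE A (Python) =====
-- def has_similar_door(r1, r2, map_):
--     r1_doors = set(map_[r1].keys())
--     r2_doors = set(map_[r2].keys())
--     intersection = r1_doors & r2_doors
--     if len(intersection) <= 1:
--         return False
--     for door in intersection:
--         if map_[r1][door][0] != map_[r2][door][0]:
--             return False
--     return True
-- ===== SOURCE B (Python) =====
-- def has_similar_door(r1, r2, map_):
--     d1 = sorted(map_[r1].items(), key=lambda kv: kv[0])
--     d2 = sorted(map_[r2].items(), key=lambda kv: kv[0])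
--     common = []
--     i = j = 0
--     while i < len(d1) and j < len(d2):
--         k1, k2 = d1[i][0], d2[j][0]
--         if k1 < k2:
--             i += 1
--         elif k2 < k1:
--             j += 1
--         else:
--             common.append((d1[i][1], d2[j][1]))
--             i += 1
--             j += 1
--     if len(common) <= 1:
--         return False
--     return all(v1[0] == v2[0] for v1, v2 in common)
-- ===== Notes on version B (the rewrite author's own statement) =====
-- stated objective: alternative
-- what changed: Replaces A's hash-based set intersection plus separate verification loop by sorting both rooms' door lists and finding the common doors with a two-pointer merge scan, then checking the first-destination matches on the collected common pairs.
-- outside the precondition, e.g. on has_similar_door(0, 1, {0: {0: [1], 1: []}, 1: {0: [2], 1: []}}): A returns False, B returns False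
import Mathlib
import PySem

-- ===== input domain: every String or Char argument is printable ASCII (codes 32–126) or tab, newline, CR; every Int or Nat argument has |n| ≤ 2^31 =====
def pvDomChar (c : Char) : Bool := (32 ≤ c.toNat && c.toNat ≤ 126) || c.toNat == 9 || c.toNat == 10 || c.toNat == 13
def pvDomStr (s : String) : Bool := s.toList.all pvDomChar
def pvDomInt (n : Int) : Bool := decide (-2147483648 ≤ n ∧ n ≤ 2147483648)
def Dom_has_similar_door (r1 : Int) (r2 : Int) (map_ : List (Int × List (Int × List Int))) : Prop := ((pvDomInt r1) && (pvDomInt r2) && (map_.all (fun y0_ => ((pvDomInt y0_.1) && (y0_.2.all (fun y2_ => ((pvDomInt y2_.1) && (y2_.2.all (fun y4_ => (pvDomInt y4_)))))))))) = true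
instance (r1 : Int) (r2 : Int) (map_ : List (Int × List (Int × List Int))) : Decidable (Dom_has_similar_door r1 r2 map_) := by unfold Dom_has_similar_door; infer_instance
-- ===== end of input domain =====

-- B replaces A's hash-set intersection and separate verification loop by sorting both
-- rooms' door lists and collecting the common doors with a two-pointer merge scan
-- (objective: alternative algorithm, same behaviour).

-- ===== PORT A =====
def has_similar_door (r1 : Int) (r2 : Int) (map_ : List (Int × List (Int × List Int))) : Bool :=
  match (PySem.Dict.mk map_).get? r1, (PySem.Dict.mk map_).get? r2 with
  | some d1, some d2 =>
      let r1_doors : PySem.Set Int := PySem.Set.ofList (PySem.Dict.keys (PySem.Dict.mk d1))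
      let r2_doors : PySem.Set Int := PySem.Set.ofList (PySem.Dict.keys (PySem.Dict.mk d2))
      let intersection := PySem.Set.inter r1_doors r2_doors
      if intersection.length ≤ 1 then false
      else
        intersection.all (fun door =>
          ((PySem.Dict.mk d1).get? door).bind (fun l => PySem.List.pyGet? l 0)
            == ((PySem.Dict.mk d2).get? door).bind (fun l => PySem.List.pyGet? l 0))
  | _, _ => false  -- map_[r1] / map_[r2]: KeyError in Python; excluded by Pre_

-- ===== PORT B =====
-- B's while loop with the two cursors i, j: the obvious structural recursion consuming
-- the two (already key-sorted) lists; it collects the (v1, v2) value pairs of common doors.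
def pvMergeCommon : List (Int × List Int) → List (Int × List Int) → List (List Int × List Int)
  | [], _ => []
  | _ :: _, [] => []
  | (k1, v1) :: t1, (k2, v2) :: t2 =>
      if k1 < k2 then pvMergeCommon t1 ((k2, v2) :: t2)
      else if k2 < k1 then pvMergeCommon ((k1, v1) :: t1) t2
      else (v1, v2) :: pvMergeCommon t1 t2
  termination_by a b => a.length + b.length

def has_similar_door_alt (r1 : Int) (r2 : Int) (map_ : List (Int × List (Int × List Int))) : Bool :=
  match (PySem.Dict.mk map_).get? r1 with
  | none => false  -- KeyError in Python; excluded by Pre_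
  | some m1 =>
    match (PySem.Dict.mk map_).get? r2 with
    | none => false  -- KeyError in Python; excluded by Pre_
    | some m2 =>
      let d1 := PySem.List.sorted m1 (fun kv => kv.1) false
      let d2 := PySem.List.sorted m2 (fun kv => kv.1) false
      let common := pvMergeCommon d1 d2
      if common.length ≤ 1 then false
      else common.all (fun p => PySem.List.pyGet? p.1 0 == PySem.List.pyGet? p.2 0)

-- ===== PRECONDITION & SPEC =====
-- Pre_ excludes: inputs where r1 or r2 is not a key of map_ (Python A raises KeyError);
-- association lists with duplicate door keys in either room (they cannot arise from a
-- Python dict under the first-match convention); and inputs where more than one door is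
-- common to the two rooms and some common door has an empty destination list on either
-- side — there Python A either raises IndexError or returns False depending on the set's
-- hash iteration order (and Python B likewise raises or returns False in sorted order).
def Pre_has_similar_door (r1 : Int) (r2 : Int) (map_ : List (Int × List (Int × List Int))) : Prop :=
  ((PySem.Dict.mk map_).get? r1).isSome = true ∧
  ((PySem.Dict.mk map_).get? r2).isSome = true ∧
  ((((PySem.Dict.mk map_).get? r1).getD []).map Prod.fst).Nodup ∧
  ((((PySem.Dict.mk map_).get? r2).getD []).map Prod.fst).Nodup ∧
  (1 < ((((PySem.Dict.mk map_).get? r1).getD []).filter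
          (fun kv => (PySem.Dict.mk (((PySem.Dict.mk map_).get? r2).getD [])).contains kv.1)).length →
    ∀ kv ∈ (((PySem.Dict.mk map_).get? r1).getD []).filter
          (fun kv => (PySem.Dict.mk (((PySem.Dict.mk map_).get? r2).getD [])).contains kv.1),
      kv.2 ≠ [] ∧ (PySem.Dict.mk (((PySem.Dict.mk map_).get? r2).getD [])).getD kv.1 [] ≠ [])
instance (r1 : Int) (r2 : Int) (map_ : List (Int × List (Int × List Int))) : Decidable (Pre_has_similar_door r1 r2 map_) := by unfold Pre_has_similar_door; infer_instance

def pvWitness_has_similar_door : Int × Int × (List (Int × List (Int × List Int))) :=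
  (0, 1, [(0, [(0, [0]), (1, [2])]), (1, [(0, [0]), (1, [2])])])

def Spec_has_similar_door (r1 : Int) (r2 : Int) (map_ : List (Int × List (Int × List Int))) (out : Bool) : Prop := out = has_similar_door_alt r1 r2 map_
instance (r1 : Int) (r2 : Int) (map_ : List (Int × List (Int × List Int))) (out : Bool) : Decidable (Spec_has_similar_door r1 r2 map_ out) := by unfold Spec_has_similar_door; infer_instance

-- ===== CLAIM (what is proved, stated in full; the proofs are below) =====
def Claim_equal_has_similar_door : Prop := ∀ (r1 : Int) (r2 : Int) (map_ : List (Int × List (Int × List Int))), Dom_has_similar_door r1 r2 map_ → Pre_has_similar_door r1 r2 map_ → Spec_has_similar_door r1 r2 map_ (has_similar_door r1 r2 map_)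

-- ===== LEMMAS AND PROOFS =====

-- all is congruent on members (pointwise agreement on the list's elements)
lemma pv_all_ext {α : Type} (l : List α) (p q : α → Bool) (h : ∀ x ∈ l, p x = q x) :
    l.all p = l.all q := by
  induction l with
  | nil => rfl
  | cons a t ih =>
      simp only [List.all_cons, h a (by simp), ih (fun x hx => h x (by simp [hx]))]

-- key-nondecreasing + distinct keys = key-strictly-increasing
lemma pv_pairwise_lt (xs : List (Int × List Int))
    (hle : xs.Pairwise (fun a b => a.1 ≤ b.1)) (hnd : (xs.map Prod.fst).Nodup) :
    xs.Pairwise (fun a b => a.1 < b.1) := by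
  have hne : xs.Pairwise (fun a b => a.1 ≠ b.1) := by
    rw [List.Nodup, List.pairwise_map] at hnd; exact hnd
  exact (hle.and hne).imp (fun h => lt_of_le_of_ne h.1 h.2)

-- a key below every stored key is absent
lemma pv_get?_none (ys : List (Int × List Int)) (k : Int) (h : ∀ p ∈ ys, p.1 ≠ k) :
    (PySem.Dict.mk ys).get? k = none := by
  rw [PySem.Dict.get?_eq_none_iff_not_mem_keys]
  simp only [PySem.Dict.keys_mk, List.mem_map]
  rintro ⟨p, hp, hpk⟩
  exact h p hp hpk

-- the merge scan over two key-strictly-sorted lists collects, in r1's sorted order,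
-- the (v1, v2) pair for every door of the first list that the second list also has
lemma pv_merge_eq (xs ys : List (Int × List Int))
    (hx : xs.Pairwise (fun a b => a.1 < b.1)) (hy : ys.Pairwise (fun a b => a.1 < b.1)) :
    pvMergeCommon xs ys
      = xs.filterMap (fun kv => ((PySem.Dict.mk ys).get? kv.1).map (fun v2 => (kv.2, v2))) := by
  revert hx hy
  fun_induction pvMergeCommon xs ys with
  | case1 ys => intro _ _; simp [List.filterMap_nil]
  | case2 h t => intro _ _
                 rw [List.filterMap_eq_nil_iff.mpr]
                 intro kv _
                 rw [pv_get?_none [] kv.1 (by simp)]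
                 rfl
  | case3 k1 v1 t1 k2 v2 t2 hlt ih =>
      intro hx hy
      rw [ih hx.tail hy, List.filterMap_cons_none]
      have hnone : (PySem.Dict.mk ((k2, v2) :: t2)).get? k1 = none := by
        apply pv_get?_none
        intro p hp
        rcases List.mem_cons.mp hp with hh | ht
        · simp only [hh]; omega
        · have := (List.pairwise_cons.mp hy).1 p ht
          simp only at this ⊢
          omega
      rw [hnone]; rfl
  | case4 k1 v1 t1 k2 v2 t2 hlt hlt2 ih =>
      intro hx hy
      rw [ih hx hy.tail]
      apply List.filterMap_congr
      intro kv hkv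
      have hne : k2 ≠ kv.1 := by
        rcases List.mem_cons.mp hkv with hh | ht
        · simp only [hh]; omega
        · have := (List.pairwise_cons.mp hx).1 kv ht
          omega
      rw [PySem.Dict.get?_mk_cons]
      simp [hne]
  | case5 k1 v1 t1 k2 v2 t2 hlt hlt2 ih =>
      intro hx hy
      have hkeq : k1 = k2 := by omega
      rw [ih hx.tail hy.tail]
      have hsome : (PySem.Dict.mk ((k2, v2) :: t2)).get? k1 = some v2 := by
        rw [PySem.Dict.get?_mk_cons]
        simp [hkeq]
      rw [show ((k1, v1) :: t1).filterMap
            (fun kv => ((PySem.Dict.mk ((k2, v2) :: t2)).get? kv.1).map (fun v2 => (kv.2, v2)))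
          = (v1, v2) :: t1.filterMap
            (fun kv => ((PySem.Dict.mk ((k2, v2) :: t2)).get? kv.1).map (fun v2 => (kv.2, v2)))
          from by rw [List.filterMap_cons]; simp [hsome]]
      congr 1
      apply List.filterMap_congr
      intro kv hkv
      have hne : k2 ≠ kv.1 := by
        have := (List.pairwise_cons.mp hx).1 kv hkv
        omega
      rw [PySem.Dict.get?_mk_cons]
      simp [hne]

-- lookup only depends on the key-value multiset when keys are distinct
lemma pv_get?_perm (s m : List (Int × List Int)) (hp : s.Perm m)
    (hnd : (m.map Prod.fst).Nodup) (k : Int) :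
    (PySem.Dict.mk s).get? k = (PySem.Dict.mk m).get? k := by
  have hnds : (s.map Prod.fst).Nodup := ((hp.map Prod.fst).nodup_iff).mpr hnd
  by_cases hk : k ∈ m.map Prod.fst
  · obtain ⟨p, hpm, hpk⟩ := List.mem_map.mp hk
    obtain ⟨k', v⟩ := p
    subst hpk
    have h1 : (PySem.Dict.mk m).get? k' = some v :=
      PySem.Dict.get?_of_mem_items _ hpm (by simpa using hnd)
    have h2 : (PySem.Dict.mk s).get? k' = some v :=
      PySem.Dict.get?_of_mem_items _ (show (k', v) ∈ (PySem.Dict.mk s).items from hp.mem_iff.mpr hpm) (by simpa using hnds)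
    rw [h1, h2]
  · have hks : k ∉ s.map Prod.fst := fun h' => hk ((hp.map Prod.fst).mem_iff.mp h')
    have hs : (PySem.Dict.mk s).get? k = none := by
      rw [PySem.Dict.get?_eq_none_iff_not_mem_keys]; simpa using hks
    have hm : (PySem.Dict.mk m).get? k = none := by
      rw [PySem.Dict.get?_eq_none_iff_not_mem_keys]; simpa using hk
    rw [hs, hm]

-- the collected pairs, as a filterMap, are the common-door filter of r1's list
lemma pv_filterMap_char (m1 d2 : List (Int × List Int)) :
    m1.filterMap (fun kv => ((PySem.Dict.mk d2).get? kv.1).map (fun v2 => (kv.2, v2)))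
      = (m1.filter (fun kv => (PySem.Dict.mk d2).contains kv.1)).map
          (fun kv => (kv.2, (PySem.Dict.mk d2).getD kv.1 [])) := by
  induction m1 with
  | nil => rfl
  | cons hd tl ih =>
      rw [List.filterMap_cons, List.filter_cons]
      by_cases hc : (PySem.Dict.mk d2).contains hd.1 = true
      · have : ((PySem.Dict.mk d2).get? hd.1).isSome = true := by
          rw [← PySem.Dict.contains_eq_isSome_get?]; exact hc
        obtain ⟨w, hw⟩ := Option.isSome_iff_exists.mp this
        rw [hw]
        simp only [Option.map_some, hc, if_true, List.map_cons, ih]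
        rw [PySem.Dict.getD_eq_get?_getD, hw, Option.getD_some]
      · have hn : (PySem.Dict.mk d2).get? hd.1 = none := by
          rw [PySem.Dict.get?_eq_none_iff_not_mem_keys]
          rw [show ((PySem.Dict.mk d2).contains hd.1) = decide (hd.1 ∈ (PySem.Dict.mk d2).keys)
                from PySem.Dict.contains_eq_decide_mem_keys _ _] at hc
          simpa using hc
        have hc' : (PySem.Dict.mk d2).contains hd.1 = false := by
          rwa [Bool.not_eq_true] at hc
        rw [hn]
        simp only [Option.map_none, hc', Bool.false_eq_true, if_false, ih]

-- ===== VERDICT (by name: the statement is the Claim_ definition above) =====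
theorem has_similar_door_spec : Claim_equal_has_similar_door := by
  intro r1 r2 map_ _hdom hpre
  obtain ⟨h1, h2, hnd1, hnd2, _hne⟩ := hpre
  obtain ⟨d1, hd1⟩ := Option.isSome_iff_exists.mp h1
  obtain ⟨d2, hd2⟩ := Option.isSome_iff_exists.mp h2
  rw [hd1] at hnd1
  rw [hd2] at hnd2
  simp only [Option.getD_some] at hnd1 hnd2
  unfold Spec_has_similar_door has_similar_door has_similar_door_alt
  rw [hd1, hd2]
  simp only []
  -- ===== A side: intersection is the common-door filter of d1 =====
  have hkeys1 : PySem.Dict.keys (PySem.Dict.mk d1) = d1.map Prod.fst := by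
    simp [PySem.Dict.keys_mk]
  have hset1 : PySem.Set.ofList (PySem.Dict.keys (PySem.Dict.mk d1)) = d1.map Prod.fst := by
    rw [hkeys1]; exact PySem.Set.ofList_eq_self_of_nodup _ hnd1
  have hmemks2 : ∀ k : Int,
      (PySem.Set.ofList (PySem.Dict.keys (PySem.Dict.mk d2))).contains k
        = (PySem.Dict.mk d2).contains k := by
    intro k
    rw [show ((PySem.Dict.mk d2).contains k) = decide (k ∈ (PySem.Dict.mk d2).keys) from
          PySem.Dict.contains_eq_decide_mem_keys _ _]
    simp
  have hinter : PySem.Set.inter (PySem.Set.ofList (PySem.Dict.keys (PySem.Dict.mk d1)))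
      (PySem.Set.ofList (PySem.Dict.keys (PySem.Dict.mk d2)))
      = (d1.filter (fun kv => (PySem.Dict.mk d2).contains kv.1)).map Prod.fst := by
    rw [PySem.Set.inter, hset1]
    rw [List.filter_map]
    congr 1
    apply List.filter_congr
    intro kv _
    exact hmemks2 kv.1
  rw [hinter]
  set F := d1.filter (fun kv => (PySem.Dict.mk d2).contains kv.1) with hF
  rw [List.length_map, List.all_map]
  have hall : F.all ((fun door => ((PySem.Dict.mk d1).get? door).bind (fun l => PySem.List.pyGet? l 0)
        == ((PySem.Dict.mk d2).get? door).bind (fun l => PySem.List.pyGet? l 0)) ∘ Prod.fst)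
      = F.all (fun kv => PySem.List.pyGet? kv.2 0
        == ((PySem.Dict.mk d2).get? kv.1).bind (fun l => PySem.List.pyGet? l 0)) := by
    apply pv_all_ext
    intro kv hkv
    have hmem : kv ∈ d1 := List.mem_of_mem_filter hkv
    have : (PySem.Dict.mk d1).get? kv.1 = some kv.2 :=
      PySem.Dict.get?_of_mem_items _ hmem (by rw [hkeys1]; exact hnd1)
    simp only [Function.comp_apply, this]
    rfl
  rw [hall]
  -- ===== B side: the merge over the sorted lists is a permutation of F's value pairs =====
  have hperm1 : (PySem.List.sorted d1 (fun kv => kv.1) false).Perm d1 :=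
    PySem.List.sorted_perm d1 (fun kv => kv.1) false
  have hperm2 : (PySem.List.sorted d2 (fun kv => kv.1) false).Perm d2 :=
    PySem.List.sorted_perm d2 (fun kv => kv.1) false
  have hlt1 : (PySem.List.sorted d1 (fun kv => kv.1) false).Pairwise (fun a b => a.1 < b.1) :=
    pv_pairwise_lt _ (PySem.List.sorted_pairwise d1 (fun kv => kv.1))
      (((hperm1.map Prod.fst).nodup_iff).mpr hnd1)
  have hlt2 : (PySem.List.sorted d2 (fun kv => kv.1) false).Pairwise (fun a b => a.1 < b.1) :=
    pv_pairwise_lt _ (PySem.List.sorted_pairwise d2 (fun kv => kv.1))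
      (((hperm2.map Prod.fst).nodup_iff).mpr hnd2)
  rw [pv_merge_eq _ _ hlt1 hlt2]
  have hgfix : (PySem.List.sorted d1 (fun kv => kv.1) false).filterMap
        (fun kv => ((PySem.Dict.mk (PySem.List.sorted d2 (fun kv => kv.1) false)).get? kv.1).map
          (fun v2 => (kv.2, v2)))
      = (PySem.List.sorted d1 (fun kv => kv.1) false).filterMap
        (fun kv => ((PySem.Dict.mk d2).get? kv.1).map (fun v2 => (kv.2, v2))) := by
    apply List.filterMap_congr
    intro kv _
    rw [pv_get?_perm _ _ hperm2 hnd2]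
  rw [hgfix]
  have hpermF : ((PySem.List.sorted d1 (fun kv => kv.1) false).filterMap
        (fun kv => ((PySem.Dict.mk d2).get? kv.1).map (fun v2 => (kv.2, v2)))).Perm
      (F.map (fun kv => (kv.2, (PySem.Dict.mk d2).getD kv.1 []))) := by
    rw [← pv_filterMap_char]
    exact List.Perm.filterMap _ hperm1
  rw [hpermF.length_eq, hpermF.all_eq, List.length_map, List.all_map]
  have hall2 : F.all ((fun p : List Int × List Int =>
        PySem.List.pyGet? p.1 0 == PySem.List.pyGet? p.2 0)
          ∘ (fun kv => (kv.2, (PySem.Dict.mk d2).getD kv.1 [])))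
      = F.all (fun kv => PySem.List.pyGet? kv.2 0
          == ((PySem.Dict.mk d2).get? kv.1).bind (fun l => PySem.List.pyGet? l 0)) := by
    apply pv_all_ext
    intro kv hkv
    have hc : (PySem.Dict.mk d2).contains kv.1 = true := by
      have := List.of_mem_filter hkv
      exact this
    have : ((PySem.Dict.mk d2).get? kv.1).isSome = true := by
      rw [← PySem.Dict.contains_eq_isSome_get?]; exact hc
    obtain ⟨w, hw⟩ := Option.isSome_iff_exists.mp this
    simp only [Function.comp_apply, hw, PySem.Dict.getD_eq_get?_getD, Option.getD_some,
      Option.bind_some]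
  rw [hall2]
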